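-- pv_equiv track=rewrite | github.com/teqn99/coding-test-practice | test_practice/3rd_test/5_올림픽_양초.py | solution
-- ===== SOURCE A (Python) =====
-- def solution(candles):
--     cnt = 0
--     while True:
--         candles.sort(reverse=True)
--         if 0 in candles[:cnt + 1] or cnt >= len(candles):
--             break
--         for i in range(cnt + 1):
--             candles[i] -= 1
--         cnt += 1  # cnt: cnt번째 날임을 의미
--     return cnt
-- ===== SOURCE B (Python) =====
-- def merge_desc(xs, ys):
--     out = []
--     i = j = 0
--     while i < len(xs) and j < len(ys):
--         if xs[i] >= ys[j]:
--             out.append(xs[i]); i += 1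
--         else:
--             out.append(ys[j]); j += 1
--     out.extend(xs[i:])
--     out.extend(ys[j:])
--     return out
--
--
-- def solution(candles):
--     # Sort once; each day the burned prefix and the untouched suffix are two
--     # sorted runs, so re-sorting is just a merge of two runs -- and when one
--     # run dominates the other the merge is a plain concatenation.
--     cs = sorted(candles, reverse=True)
--     cnt = 0
--     while cnt < len(cs) and (cs[cnt] > 0 or 0 not in cs[:cnt + 1]):
--         burned = [c - 1 for c in cs[:cnt + 1]]
--         rest = cs[cnt + 1:]
--         if not rest or burned[-1] >= rest[0]:
--             cs = burned + rest
--         elif rest[-1] >= burned[0]: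
--             cs = rest + burned
--         else:
--             cs = merge_desc(burned, rest)
--         cnt += 1
--     return cnt
-- ===== Notes on version B (the rewrite author's own statement) =====
-- stated objective: alternative
-- what changed: B sorts once and, after each day's burn, restores sorted order by a two-run merge (a plain concatenation when one run dominates) of the decremented prefix with the untouched suffix, instead of A's full re-sort of the whole list on every iteration of the day loop.
import Mathlib
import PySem

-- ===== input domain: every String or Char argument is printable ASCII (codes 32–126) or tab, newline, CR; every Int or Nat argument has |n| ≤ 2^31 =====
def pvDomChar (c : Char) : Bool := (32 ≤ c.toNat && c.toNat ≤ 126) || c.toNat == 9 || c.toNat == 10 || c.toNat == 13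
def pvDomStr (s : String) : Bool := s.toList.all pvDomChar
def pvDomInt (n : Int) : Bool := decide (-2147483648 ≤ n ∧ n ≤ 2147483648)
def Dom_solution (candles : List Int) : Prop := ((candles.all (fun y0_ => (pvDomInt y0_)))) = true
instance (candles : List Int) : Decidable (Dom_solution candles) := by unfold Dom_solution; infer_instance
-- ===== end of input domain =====

-- B sorts once and restores order after each day's burn by a two-run merge (or a
-- plain concatenation when one run dominates) of the decremented prefix with the
-- untouched suffix, instead of A's per-day full re-sort of the whole list.
-- A sorts/mutates its argument list in place; the equivalence proved here is about
-- the return value only (B does not mutate its argument).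

-- ===== PORT A =====
-- while-True loop of A; fuel = len+1 is a totality device only (the loop breaks
-- no later than cnt = len, and the length is preserved by every iteration).
-- candles[:cnt+1] with cnt+1 ≥ 1 is List.take (cnt+1); candles.sort(reverse=True)
-- is PySem.List.sorted · (fun x => x) true.
def solutionGo (fuel : Nat) (candles : List Int) (cnt : Nat) : Int :=
  -- cs = the re-sorted list at the top of each iteration
  if 0 ∈ (PySem.List.sorted candles (fun x => x) true).take (cnt + 1) ∨
      cnt ≥ (PySem.List.sorted candles (fun x => x) true).length then (cnt : Int)
  else
    match fuel with
    | 0 => (cnt : Int)  -- never reached with fuel = len + 1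
    | fuel + 1 =>
      -- for i in range(cnt+1): candles[i] -= 1
      solutionGo fuel
        (((PySem.List.sorted candles (fun x => x) true).take (cnt + 1)).map (· - 1) ++
          (PySem.List.sorted candles (fun x => x) true).drop (cnt + 1)) (cnt + 1)

def solution (candles : List Int) : Int :=
  solutionGo (candles.length + 1) candles 0

-- ===== PORT B =====
-- hand-written descending merge of Source B, transcribed structurally
def mergeDesc : List Int → List Int → List Int
  | [], ys => ys
  | x :: xs, [] => x :: xs
  | x :: xs, y :: ys =>
    if x ≥ y then x :: mergeDesc xs (y :: ys) else y :: mergeDesc (x :: xs) ys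

-- cs[cnt] is read only under 'cnt < len(cs)' (Python's short-circuit 'and'), so
-- List.getD is exact; burned[-1]/rest[0]/rest[-1] are read only on nonempty lists,
-- so getLastD/headD are exact where evaluated.
def solutionAltGo (fuel : Nat) (cs : List Int) (cnt : Nat) : Int :=
  if cnt < cs.length ∧ (0 < cs.getD cnt 0 ∨ 0 ∉ cs.take (cnt + 1)) then
    match fuel with
    | 0 => (cnt : Int)  -- never reached with fuel = len + 1
    | fuel + 1 =>
      let burned := (cs.take (cnt + 1)).map (· - 1)
      let rest := cs.drop (cnt + 1)
      if rest = [] ∨ rest.headD 0 ≤ burned.getLastD 0 then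
        solutionAltGo fuel (burned ++ rest) (cnt + 1)
      else if burned.headD 0 ≤ rest.getLastD 0 then
        solutionAltGo fuel (rest ++ burned) (cnt + 1)
      else
        solutionAltGo fuel (mergeDesc burned rest) (cnt + 1)
  else (cnt : Int)

def solution_alt (candles : List Int) : Int :=
  solutionAltGo (candles.length + 1) (PySem.List.sorted candles (fun x => x) true) 0

-- ===== PRECONDITION & SPEC =====
def Spec_solution (candles : List Int) (out : Int) : Prop := out = solution_alt candles
instance (candles : List Int) (out : Int) : Decidable (Spec_solution candles out) := by unfold Spec_solution; infer_instance

-- ===== CLAIM (what is proved, stated in full; the proofs are below) =====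
def Claim_equal_solution : Prop := ∀ (candles : List Int), Dom_solution candles → Spec_solution candles (solution candles)

-- ===== LEMMAS AND PROOFS =====

theorem mergeDesc_perm (xs : List Int) : ∀ ys : List Int, (mergeDesc xs ys).Perm (xs ++ ys) := by
  induction xs with
  | nil => intro ys; simp [mergeDesc]
  | cons x xs ih =>
    intro ys
    induction ys with
    | nil => simp [mergeDesc]
    | cons y ys ihy =>
      simp only [mergeDesc]
      split
      · simpa using (ih (y :: ys)).cons x
      · exact ((ihy.cons y).trans (List.perm_middle (a := y) (l₁ := x :: xs) (l₂ := ys)).symm)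

theorem mergeDesc_mem {z : Int} {xs ys : List Int} (h : z ∈ mergeDesc xs ys) :
    z ∈ xs ∨ z ∈ ys := by
  have := (mergeDesc_perm xs ys).mem_iff.mp h
  simpa using this

theorem mergeDesc_pairwise (xs : List Int) : ∀ ys : List Int,
    xs.Pairwise (fun a b => b ≤ a) → ys.Pairwise (fun a b => b ≤ a) →
    (mergeDesc xs ys).Pairwise (fun a b => b ≤ a) := by
  induction xs with
  | nil => intro ys _ hy; simpa [mergeDesc] using hy
  | cons x xs ih =>
    intro ys hx hy
    induction ys with
    | nil => simpa [mergeDesc] using hx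
    | cons y ys ihy =>
      rw [List.pairwise_cons] at hx hy
      simp only [mergeDesc]
      split
      · rename_i hxy
        refine List.pairwise_cons.mpr ⟨?_, ih (y :: ys) hx.2 (List.pairwise_cons.mpr hy)⟩
        intro z hz
        rcases mergeDesc_mem hz with h | h
        · exact hx.1 z h
        · rcases List.mem_cons.mp h with rfl | h
          · exact hxy
          · exact le_trans (hy.1 z h) hxy
      · rename_i hxy
        push Not at hxy
        refine List.pairwise_cons.mpr ⟨?_, ihy hy.2⟩
        intro z hz
        rcases mergeDesc_mem hz with h | h
        · rcases List.mem_cons.mp h with rfl | h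
          · exact le_of_lt hxy
          · exact le_trans (hx.1 z h) (le_of_lt hxy)
        · exact hy.1 z h

-- sorted(·, reverse=True) of a list equals any descending rearrangement of it
theorem sorted_rev_eq_of_perm_of_desc (l m : List Int)
    (hp : m.Perm l) (hs : m.Pairwise (fun a b => b ≤ a)) :
    PySem.List.sorted l (fun x => x) true = m := by
  refine PySem.List.eq_of_perm_of_pairwise_le_of_injective (fun x : Int => -x)
    neg_injective ((PySem.List.sorted_perm l (fun x => x) true).trans hp.symm) ?_ ?_
  · exact (PySem.List.sorted_pairwise_rev l (fun x => x)).imp (fun h => by simpa using neg_le_neg h)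
  · exact hs.imp (fun h => by simpa using neg_le_neg h)

theorem desc_take_map_sub (cs : List Int) (k : Nat)
    (h : cs.Pairwise (fun a b => b ≤ a)) :
    ((cs.take k).map (· - 1)).Pairwise (fun a b => b ≤ a) :=
  ((h.sublist (List.take_sublist k cs)).map _ (fun h => by omega))


theorem desc_le_headD (l : List Int) (d : Int) (h : l.Pairwise (fun a b => b ≤ a)) :
    ∀ x ∈ l, x ≤ l.headD d := by
  cases l with
  | nil => intro x hx; cases hx
  | cons a t =>
    intro x hx
    rcases List.mem_cons.mp hx with rfl | hx
    · simp
    · simpa using (List.pairwise_cons.mp h).1 x hx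

theorem desc_getLastD_le (l : List Int) (h : l.Pairwise (fun a b => b ≤ a)) :
    ∀ (d : Int), ∀ x ∈ l, l.getLastD d ≤ x := by
  induction l with
  | nil => intro d x hx; cases hx
  | cons a t ih =>
    intro d x hx
    have h' := List.pairwise_cons.mp h
    rw [List.getLastD_cons]
    rcases List.mem_cons.mp hx with rfl | hx
    · cases t with
      | nil => simp
      | cons b u =>
        exact le_trans (ih h'.2 x b (by simp)) (h'.1 b (by simp))
    · exact ih h'.2 a x hx

-- in a descending list, position cnt bounds every element of the (cnt+1)-prefix from below
theorem desc_getD_le_mem_take (cs : List Int) (cnt : Nat) (x : Int)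
    (hd : cs.Pairwise (fun a b => b ≤ a)) (hlen : cnt < cs.length)
    (hx : x ∈ cs.take (cnt + 1)) : cs.getD cnt 0 ≤ x := by
  rcases List.mem_iff_getElem.mp hx with ⟨i, hi, rfl⟩
  have hi' : i < cnt + 1 := lt_of_lt_of_le hi (by simp)
  have hgd : cs.getD cnt 0 = cs[cnt] := List.getD_eq_getElem cs 0 hlen
  rw [hgd, List.getElem_take]
  rcases Nat.lt_or_ge i cnt with hlt | hge
  · exact (List.pairwise_iff_getElem.mp hd) i cnt _ _ hlt
  · have : i = cnt := by omega
    subst this; exact le_refl _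

theorem go_eq (fuel : Nat) : ∀ (l : List Int) (cnt : Nat),
    solutionGo fuel l cnt = solutionAltGo fuel (PySem.List.sorted l (fun x => x) true) cnt := by
  induction fuel with
  | zero =>
    intro l cnt
    simp only [solutionGo, solutionAltGo]
    split <;> split <;> rfl
  | succ fuel ih =>
    intro l cnt
    have hdesc := PySem.List.sorted_pairwise_rev l (fun x => x)
    simp only [solutionGo, solutionAltGo]
    by_cases h : 0 ∈ (PySem.List.sorted l (fun x => x) true).take (cnt + 1) ∨
        cnt ≥ (PySem.List.sorted l (fun x => x) true).length
    · rw [if_pos h, if_neg ?_]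
      rintro ⟨hc, hz⟩
      rcases h with h0 | h0
      · rcases hz with hp | hn
        · exact absurd hp (by
            have := desc_getD_le_mem_take _ cnt 0 hdesc hc h0
            omega)
        · exact hn h0
      · omega
    · push Not at h
      rw [if_neg (by rintro (h0 | h0); exacts [h.1 h0, absurd h0 (by omega)]),
        if_pos ⟨by omega, Or.inr h.1⟩]
      -- facts about the two runs
      have hb : (((PySem.List.sorted l (fun x => x) true).take (cnt + 1)).map (· - 1)).Pairwise
          (fun a b => b ≤ a) := desc_take_map_sub _ _ hdesc
      have hr : ((PySem.List.sorted l (fun x => x) true).drop (cnt + 1)).Pairwise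
          (fun a b => b ≤ a) := hdesc.sublist (List.drop_sublist _ _)
      split
      · rename_i hc1
        rw [ih]
        congr 1
        refine sorted_rev_eq_of_perm_of_desc _ _ (List.Perm.refl _) ?_
        refine List.pairwise_append.mpr ⟨hb, hr, ?_⟩
        intro a ha b hbm
        rcases hc1 with hre | hle
        · rw [hre] at hbm; cases hbm
        · exact le_trans (le_trans (desc_le_headD _ 0 hr b hbm) hle)
            (desc_getLastD_le _ hb 0 a ha)
      · rename_i hc2
        split
        · rename_i hc3
          rw [ih]
          congr 1
          refine sorted_rev_eq_of_perm_of_desc _ _ (List.perm_append_comm) ?_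
          refine List.pairwise_append.mpr ⟨hr, hb, ?_⟩
          intro a ha b hbm
          exact le_trans (le_trans (desc_le_headD _ 0 hb b hbm) hc3)
            (desc_getLastD_le _ hr 0 a ha)
        · rw [ih]
          congr 1
          refine sorted_rev_eq_of_perm_of_desc _ _ (mergeDesc_perm _ _) ?_
          exact mergeDesc_pairwise _ _ hb hr

-- ===== VERDICT (by name: the statement is the Claim_ definition above) =====
theorem solution_spec : Claim_equal_solution := by
  intro candles _
  unfold Spec_solution solution solution_alt
  rw [go_eq]
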